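-- pv_equiv track=rewrite | github.com/boto/s3transfer | s3transfer/checksums.py | combine_crc32
-- ===== SOURCE A (Python) =====
-- def combine_crc32(crc1, crc2, len2):
--     """Combine two CRC32 values.
--
--     :type crc1: int
--     :param crc1: Current CRC32 integer value.
--
--     :type crc2: int
--     :param crc2: Second CRC32 integer value to combine.
--
--     :type len2: int
--     :param len2: Length of data that produced `crc2`.
--
--     :rtype: int
--     :returns: Combined CRC32 integer value.
--     """
--
--     POLY = 0xEDB88320
--
--     def gf2_matrix_multiply(mat, vec):
--         """Multiply a matrix by a vector in GF(2)"""
--         result = 0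
--         for i in range(32):
--             if vec & 1:
--                 result ^= mat[i]
--             vec >>= 1
--         return result
--
--     def gf2_matrix_square(mat):
--         """Square a matrix in GF(2)"""
--         result = [0] * 32
--         for i in range(32):
--             result[i] = gf2_matrix_multiply(mat, mat[i])
--         return result
--
--     def crc32_matrix_power(length):
--         """Generate transformation matrix for CRC32 over given length"""
--         # Base transformation matrix (multiply by x)
--         mat = [0] * 32
--         mat[0] = POLY
--         for i in range(1, 32):
--             mat[i] = 1 << (i - 1)
--
--         # Compute mat^length using binary exponentiation
--         result = [0] * 32
--         for i in range(32):
--             result[i] = 1 << i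
--
--         n = length
--         while n > 0:
--             if n & 1:
--                 result = [
--                     gf2_matrix_multiply(mat, result[i]) for i in range(32)
--                 ]
--             mat = gf2_matrix_square(mat)
--             n >>= 1
--
--         return result
--
--     if len2 == 0:
--         return crc1
--
--     transform_matrix = crc32_matrix_power(len2 * 8)
--     transformed_crc1 = gf2_matrix_multiply(transform_matrix, crc1)
--     combined = transformed_crc1 ^ crc2
--
--     return combined & 0xFFFFFFFF
-- ===== SOURCE B (Python) =====
-- def combine_crc32(crc1, crc2, len2):
--     """Combine two CRC32 values: zlib-style GF(2)[x] mod-P arithmetic on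
--     32-bit words instead of 32x32 bit-matrix exponentiation."""
--     POLY = 0xEDB88320
--
--     def multmodp(a, b):
--         """Product of reflected polynomials a*b mod P (bit 31-j = coeff of x^j)."""
--         p = 0
--         for _ in range(32):
--             if a & 0x80000000:
--                 p ^= b
--             a = (a << 1) & 0xFFFFFFFF
--             b = (b >> 1) ^ (POLY if b & 1 else 0)
--         return p
--
--     if len2 == 0:
--         return crc1
--
--     # acc = x^(8*len2) mod P by binary exponentiation (0x80000000 represents 1).
--     acc = 0x80000000
--     sq = 0x40000000  # represents x
--     n = len2 * 8
--     while n > 0: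
--         if n & 1:
--             acc = multmodp(sq, acc)
--         sq = multmodp(sq, sq)
--         n >>= 1
--
--     return (multmodp(acc, crc1 & 0xFFFFFFFF) ^ crc2) & 0xFFFFFFFF
-- ===== Notes on version B (the rewrite author's own statement) =====
-- stated objective: faster
-- what changed: A combines the CRCs by binary exponentiation of an explicit 32x32 GF(2) bit-matrix (lists of 32 rows, squared via 32 matrix-vector products per step); B instead does zlib-style polynomial arithmetic in GF(2)[x] mod the CRC polynomial on single 32-bit words (one multmodp for the square and one for the accumulate per bit of len2*8), then applies the resulting polynomial to crc1.
import Mathlib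
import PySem

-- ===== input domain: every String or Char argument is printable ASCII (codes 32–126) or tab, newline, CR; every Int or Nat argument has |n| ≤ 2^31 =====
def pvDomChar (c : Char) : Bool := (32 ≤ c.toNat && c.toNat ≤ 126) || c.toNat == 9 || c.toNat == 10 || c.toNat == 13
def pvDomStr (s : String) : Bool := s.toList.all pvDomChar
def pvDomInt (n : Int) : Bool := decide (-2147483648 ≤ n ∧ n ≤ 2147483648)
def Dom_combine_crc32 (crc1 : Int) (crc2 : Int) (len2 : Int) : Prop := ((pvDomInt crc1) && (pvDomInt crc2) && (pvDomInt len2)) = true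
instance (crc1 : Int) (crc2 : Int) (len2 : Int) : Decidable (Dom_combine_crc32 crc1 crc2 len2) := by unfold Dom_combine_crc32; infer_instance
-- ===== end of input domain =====

-- B replaces A's 32x32 bit-matrix exponentiation by zlib-style GF(2)[x] mod-P arithmetic
-- on single 32-bit words (same O(log len2) doubling, ~32x less work per step).

-- ===== PORT A =====

def pvPOLY : Int := 0xEDB88320

-- `for i in range(32): if vec & 1: result ^= mat[i]; vec >>= 1` as fuel recursion.
-- mat always has length 32, so `mat[i]` is in range; ported as `mat.getD i 0` (exact here).
def pvGmmAux (mat : List Int) (result vec : Int) (i : Nat) : Nat → Int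
  | 0 => result
  | fuel+1 =>
      pvGmmAux mat (if PySem.Int.band vec 1 ≠ 0 then PySem.Int.bxor result (mat.getD i 0) else result)
        (vec >>> 1) (i+1) fuel

def pvGf2MatrixMultiply (mat : List Int) (vec : Int) : Int := pvGmmAux mat 0 vec 0 32

-- `result = [0]*32; for i in range(32): result[i] = gf2_matrix_multiply(mat, mat[i])`
def pvGf2MatrixSquare (mat : List Int) : List Int :=
  (List.range 32).map fun i => pvGf2MatrixMultiply mat (mat.getD i 0)

-- `while n > 0: if n & 1: result = [...]; mat = square(mat); n >>= 1`,
-- with the loop counter as the Nat it stays positive on (n ≤ 0 runs zero iterations).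
def pvPowAux (mat result : List Int) (n : Nat) : List Int :=
  if n = 0 then result
  else
    pvPowAux (pvGf2MatrixSquare mat)
      (if n &&& 1 = 1 then (List.range 32).map (fun i => pvGf2MatrixMultiply mat (result.getD i 0))
       else result)
      (n >>> 1)
  termination_by n
  decreasing_by simp only [Nat.shiftRight_one]; omega

def pvCrc32MatrixPower (length : Int) : List Int :=
  let mat := (List.range 32).map fun (i : Nat) => if i = 0 then pvPOLY else (1 : Int) <<< (i-1)
  let result := (List.range 32).map fun (i : Nat) => (1 : Int) <<< i
  pvPowAux mat result length.toNat     -- `while n > 0`: a non-positive n loops zero times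

def combine_crc32 (crc1 : Int) (crc2 : Int) (len2 : Int) : Int :=
  if len2 = 0 then crc1
  else
    PySem.Int.band
      (PySem.Int.bxor (pvGf2MatrixMultiply (pvCrc32MatrixPower (len2 * 8)) crc1) crc2)
      0xFFFFFFFF

-- ===== PORT B =====

-- `for _ in range(32): if a & 0x80000000: p ^= b; a = (a << 1) & 0xFFFFFFFF;
--  b = (b >> 1) ^ (POLY if b & 1 else 0)` as fuel recursion.
def pvMmpAux (p a b : Int) : Nat → Int
  | 0 => p
  | fuel+1 =>
      pvMmpAux (if PySem.Int.band a 0x80000000 ≠ 0 then PySem.Int.bxor p b else p)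
        (PySem.Int.band (a <<< 1) 0xFFFFFFFF)
        (PySem.Int.bxor (b >>> 1) (if PySem.Int.band b 1 ≠ 0 then 0xEDB88320 else 0))
        fuel

def pvMultmodp (a b : Int) : Int := pvMmpAux 0 a b 32

-- `while n > 0: if n & 1: acc = multmodp(sq, acc); sq = multmodp(sq, sq); n >>= 1`
def pvPowXAux (acc sq : Int) (n : Nat) : Int :=
  if n = 0 then acc
  else pvPowXAux (if n &&& 1 = 1 then pvMultmodp sq acc else acc) (pvMultmodp sq sq) (n >>> 1)
  termination_by n
  decreasing_by simp only [Nat.shiftRight_one]; omega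

def combine_crc32_alt (crc1 : Int) (crc2 : Int) (len2 : Int) : Int :=
  if len2 = 0 then crc1
  else
    let acc := pvPowXAux 0x80000000 0x40000000 (len2 * 8).toNat  -- `while n > 0`
    PySem.Int.band
      (PySem.Int.bxor (pvMultmodp acc (PySem.Int.band crc1 0xFFFFFFFF)) crc2)
      0xFFFFFFFF

-- ===== PRECONDITION & SPEC =====
def Spec_combine_crc32 (crc1 : Int) (crc2 : Int) (len2 : Int) (out : Int) : Prop := out = combine_crc32_alt crc1 crc2 len2
instance (crc1 : Int) (crc2 : Int) (len2 : Int) (out : Int) : Decidable (Spec_combine_crc32 crc1 crc2 len2 out) := by unfold Spec_combine_crc32; infer_instance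

-- ===== CLAIM (what is proved, stated in full; the proofs are below) =====
def Claim_equal_combine_crc32 : Prop := ∀ (crc1 : Int) (crc2 : Int) (len2 : Int), Dom_combine_crc32 crc1 crc2 len2 → Spec_combine_crc32 crc1 crc2 len2 (combine_crc32 crc1 crc2 len2)

-- ===== LEMMAS AND PROOFS =====

-- ---- Nat-level model of both programs (all loop state is a 32-bit word) ----

def nPOLY : Nat := 0xEDB88320

-- one CRC shift step: multiplication by x in the reflected representation
def nT (v : Nat) : Nat := (v >>> 1) ^^^ (if v &&& 1 = 1 then nPOLY else 0)

def nTpow : Nat → Nat → Nat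
  | 0, v => v
  | k+1, v => nT (nTpow k v)

def nGmmAux (mat : List Nat) (r v : Nat) (i : Nat) : Nat → Nat
  | 0 => r
  | k+1 => nGmmAux mat (if v &&& 1 = 1 then r ^^^ mat.getD i 0 else r) (v >>> 1) (i+1) k

def nGmm (mat : List Nat) (v : Nat) : Nat := nGmmAux mat 0 v 0 32

def nSq (mat : List Nat) : List Nat := (List.range 32).map fun i => nGmm mat (mat.getD i 0)

def nPowAux (mat res : List Nat) (n : Nat) : List Nat :=
  if n = 0 then res
  else
    nPowAux (nSq mat)
      (if n &&& 1 = 1 then (List.range 32).map (fun i => nGmm mat (res.getD i 0)) else res)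
      (n >>> 1)
  termination_by n
  decreasing_by simp only [Nat.shiftRight_one]; omega

def nBase : List Nat := (List.range 32).map fun i => if i = 0 then nPOLY else 1 <<< (i-1)
def nId : List Nat := (List.range 32).map fun i => 1 <<< i

def nMmpAux (p a b : Nat) : Nat → Nat
  | 0 => p
  | k+1 => nMmpAux (if a &&& 0x80000000 ≠ 0 then p ^^^ b else p) ((a <<< 1) &&& 0xFFFFFFFF) (nT b) k

def nMmp (a b : Nat) : Nat := nMmpAux 0 a b 32

def nPowX (acc sq : Nat) (n : Nat) : Nat :=
  if n = 0 then acc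
  else nPowX (if n &&& 1 = 1 then nMmp sq acc else acc) (nMmp sq sq) (n >>> 1)
  termination_by n
  decreasing_by simp only [Nat.shiftRight_one]; omega

-- ---- basic facts about nT ----

theorem nT_lin (x y : Nat) : nT (x ^^^ y) = nT x ^^^ nT y := by
  unfold nT
  rw [Nat.shiftRight_xor_distrib, Nat.and_xor_distrib_right]
  rcases Nat.mod_two_eq_zero_or_one x with hx | hx <;>
    rcases Nat.mod_two_eq_zero_or_one y with hy | hy <;>
    simp [Nat.and_one_is_mod, hx, hy, Nat.xor_comm, Nat.xor_left_comm,
      Nat.xor_self, Nat.zero_xor]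

theorem nT_lt {v : Nat} (h : v < 2^32) : nT v < 2^32 := by
  unfold nT
  have h1 : v >>> 1 < 2^32 := by rw [Nat.shiftRight_one]; omega
  split
  · exact Nat.xor_lt_two_pow h1 (by norm_num [nPOLY])
  · simpa using h1

theorem nTpow_lin (k x y : Nat) : nTpow k (x ^^^ y) = nTpow k x ^^^ nTpow k y := by
  induction k with
  | zero => rfl
  | succ k ih => simp [nTpow, ih, nT_lin]

theorem nTpow_lt {v : Nat} (k : Nat) (h : v < 2^32) : nTpow k v < 2^32 := by
  induction k with
  | zero => exact h
  | succ k ih => exact nT_lt ih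

theorem nTpow_add (a b v : Nat) : nTpow (a + b) v = nTpow a (nTpow b v) := by
  induction a with
  | zero => simp [nTpow]
  | succ a ih => simpa [nTpow, Nat.succ_add] using congrArg nT ih

theorem nTpow_inner (k v : Nat) : nTpow k (nT v) = nT (nTpow k v) := by
  have h := nTpow_add k 1 v
  have h2 := nTpow_add 1 k v
  simp [nTpow] at h h2
  omega

-- ---- generic linear extension from the 32 basis bits ----

def IsLin (f : Nat → Nat) : Prop := ∀ x y, f (x ^^^ y) = f x ^^^ f y

theorem isLin_zero {f : Nat → Nat} (hf : IsLin f) : f 0 = 0 := by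
  have h := hf 0 0
  simpa using h

theorem lt_two_pow_of_testBit_false {v k : Nat} (h : v < 2^(k+1)) (hb : v.testBit k = false) :
    v < 2^k := by
  have hp : 0 < 2^k := Nat.two_pow_pos k
  have h1 : v / 2^k < 2 := by
    rw [Nat.div_lt_iff_lt_mul hp]
    calc v < 2^(k+1) := h
    _ = 2 * 2^k := by ring
  have h2 : v / 2^k % 2 = 0 := by rw [← Nat.toNat_testBit, hb]; rfl
  have h3 : v / 2^k = 0 := by
    generalize hq : v / 2^k = q at h1 h2
    omega
  have h4 := Nat.lt_of_div_eq_zero hp h3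
  exact h4

theorem lin_ext_aux {f g : Nat → Nat} (hf : IsLin f) (hg : IsLin g) :
    ∀ k, (∀ j < k, f (2^j) = g (2^j)) → ∀ v < 2^k, f v = g v := by
  intro k
  induction k with
  | zero =>
    intro _ v hv
    interval_cases v
    rw [isLin_zero hf, isLin_zero hg]
  | succ k ih =>
    intro hb v hv
    by_cases hbit : v.testBit k
    · set v' := v ^^^ 2^k with hv'
      have hb' : v'.testBit k = false := by
        simp [hv', Nat.testBit_xor, hbit, Nat.testBit_two_pow_self]
      have hlt' : v' < 2^(k+1) :=
        Nat.xor_lt_two_pow hv (Nat.pow_lt_pow_right (by norm_num) (by omega))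
      have hlt : v' < 2^k := lt_two_pow_of_testBit_false hlt' hb'
      have hvv : v = v' ^^^ 2^k := by
        rw [hv', Nat.xor_assoc, Nat.xor_self, Nat.xor_zero]
      rw [hvv, hf, hg, ih (fun j hj => hb j (by omega)) v' hlt, hb k (by omega)]
    · have hbit' : v.testBit k = false := by simpa using hbit
      exact ih (fun j hj => hb j (by omega)) v (lt_two_pow_of_testBit_false hv hbit')

theorem lin_ext {f g : Nat → Nat} (hf : IsLin f) (hg : IsLin g)
    (h : ∀ j < 32, f (2^j) = g (2^j)) : ∀ v < 2^32, f v = g v :=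
  lin_ext_aux hf hg 32 h

-- ---- matrix-multiply model ----

theorem nGmmAux_acc (mat : List Nat) (r v i k : Nat) :
    nGmmAux mat r v i k = r ^^^ nGmmAux mat 0 v i k := by
  induction k generalizing r v i with
  | zero => simp [nGmmAux]
  | succ k ih =>
    simp only [nGmmAux]
    rw [ih, @ih (if v &&& 1 = 1 then 0 ^^^ mat.getD i 0 else 0)]
    by_cases h : v % 2 = 1 <;>
      simp [Nat.and_one_is_mod, h, Nat.xor_assoc]

theorem nGmmAux_zero_v (mat : List Nat) (r i k : Nat) : nGmmAux mat r 0 i k = r := by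
  induction k generalizing r i with
  | zero => rfl
  | succ k ih => simpa [nGmmAux] using ih ..

theorem nGmmAux_lin (mat : List Nat) (k : Nat) : ∀ x y i,
    nGmmAux mat 0 (x ^^^ y) i k = nGmmAux mat 0 x i k ^^^ nGmmAux mat 0 y i k := by
  induction k with
  | zero => intro x y i; simp [nGmmAux]
  | succ k ih =>
    intro x y i
    simp only [nGmmAux]
    rw [nGmmAux_acc, @nGmmAux_acc mat (if x &&& 1 = 1 then _ else _),
      @nGmmAux_acc mat (if y &&& 1 = 1 then _ else _),
      Nat.shiftRight_xor_distrib, ih]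
    rw [Nat.and_xor_distrib_right]
    rcases Nat.mod_two_eq_zero_or_one x with hx | hx <;>
      rcases Nat.mod_two_eq_zero_or_one y with hy | hy <;>
      simp [Nat.and_one_is_mod, hx, hy, Nat.xor_assoc, Nat.xor_comm, Nat.xor_left_comm,
        Nat.xor_self, Nat.zero_xor]

theorem nGmmAux_pow2 (mat : List Nat) (k : Nat) : ∀ j i, j < k →
    nGmmAux mat 0 (2^j) i k = mat.getD (i+j) 0 := by
  induction k with
  | zero => omega
  | succ k ih =>
    intro j i hj
    match j with
    | 0 =>
      have h1 : (2^0 : Nat) &&& 1 = 1 := by decide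
      have h2 : (2^0 : Nat) >>> 1 = 0 := by decide
      simp only [nGmmAux, h1, h2, if_pos]
      rw [nGmmAux_zero_v]
      simp
    | j+1 =>
      have h1 : ¬ ((2^(j+1) : Nat) &&& 1 = 1) := by
        rw [Nat.and_one_is_mod, Nat.pow_succ, Nat.mul_mod_left]
        omega
      have h2 : (2^(j+1) : Nat) >>> 1 = 2^j := by
        rw [Nat.shiftRight_one, Nat.pow_succ, Nat.mul_div_cancel]
        norm_num
      simp only [nGmmAux, h1, if_false, h2]
      rw [ih j (i+1) (by omega)]
      congr 1
      omega

def RepM (mat : List Nat) (e : Nat) : Prop := ∀ j < 32, mat.getD j 0 = nTpow e (2^j)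

theorem nGmm_apply {mat : List Nat} {e : Nat} (h : RepM mat e) :
    ∀ v < 2^32, nGmm mat v = nTpow e v := by
  apply lin_ext (f := fun v => nGmm mat v) (g := fun v => nTpow e v)
  · intro x y; exact nGmmAux_lin mat 32 x y 0
  · intro x y; exact nTpow_lin e x y
  · intro j hj
    show nGmm mat (2^j) = nTpow e (2^j)
    unfold nGmm
    rw [nGmmAux_pow2 mat 32 j 0 hj]
    simpa using h j hj

theorem getD_map_range {f : Nat → Nat} {j n : Nat} (h : j < n) :
    (((List.range n).map f).getD j 0) = f j := by
  rw [List.getD_eq_getElem?_getD]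
  simp [h]

theorem two_pow_lt_32 {j : Nat} (hj : j < 32) : (2:Nat)^j < 2^32 :=
  Nat.pow_lt_pow_right (by norm_num) hj

theorem nSq_rep {mat : List Nat} {e : Nat} (h : RepM mat e) : RepM (nSq mat) (e + e) := by
  intro j hj
  unfold nSq
  rw [getD_map_range hj, h j hj,
    nGmm_apply h _ (nTpow_lt e (two_pow_lt_32 hj)), nTpow_add]

theorem nT_two_pow_succ (s : Nat) : nT (2^(s+1)) = 2^s := by
  unfold nT
  have h1 : ¬ ((2^(s+1) : Nat) &&& 1 = 1) := by
    rw [Nat.and_one_is_mod, Nat.pow_succ, Nat.mul_mod_left]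
    omega
  have h2 : (2^(s+1) : Nat) >>> 1 = 2^s := by
    rw [Nat.shiftRight_one, Nat.pow_succ, Nat.mul_div_cancel]
    norm_num
  simp [h2]

theorem nBase_rep : RepM nBase 1 := by
  intro j hj
  unfold nBase
  rw [getD_map_range hj]
  match j with
  | 0 => decide
  | s+1 =>
    show 1 <<< s = nTpow 1 (2^(s+1))
    show 1 <<< s = nT (2^(s+1))
    rw [nT_two_pow_succ, Nat.shiftLeft_eq, one_mul]

theorem nId_rep : RepM nId 0 := by
  intro j hj
  unfold nId
  rw [getD_map_range hj]
  show 1 <<< j = 2^j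
  rw [Nat.shiftLeft_eq, one_mul]

theorem nPowAux_rep : ∀ (n : Nat) {mat res : List Nat} {e r : Nat},
    RepM mat e → RepM res r → RepM (nPowAux mat res n) (r + e * n) := by
  intro n
  induction n using Nat.strong_induction_on with
  | _ n ih =>
    intro mat res e r hm hr
    rw [nPowAux]
    by_cases h0 : n = 0
    · simpa [h0] using hr
    · simp only [h0, if_false]
      have hn2 : n >>> 1 = n / 2 := Nat.shiftRight_one n
      have hlt : n >>> 1 < n := by omega
      by_cases hodd : n &&& 1 = 1
      · have hmod : n % 2 = 1 := by rw [← Nat.and_one_is_mod]; exact hodd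
        simp only [hodd, if_pos]
        have hres' : RepM ((List.range 32).map fun i => nGmm mat (res.getD i 0)) (e + r) := by
          intro j hj
          rw [getD_map_range hj, hr j hj,
            nGmm_apply hm _ (nTpow_lt r (two_pow_lt_32 hj)), ← nTpow_add]
        have := ih (n >>> 1) hlt (nSq_rep hm) hres'
        have harith : (e + r) + (e + e) * (n >>> 1) = r + e * n := by
          rw [hn2]
          conv_rhs => rw [show n = 2*(n/2)+1 by omega]
          ring
        rwa [harith] at this
      · have hmod : n % 2 = 0 := by
          rw [← Nat.and_one_is_mod]
          rcases Nat.mod_two_eq_zero_or_one n with h | h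
          · rwa [Nat.and_one_is_mod]
          · exact absurd (by rwa [Nat.and_one_is_mod]) hodd
        simp only [hodd, if_false]
        have := ih (n >>> 1) hlt (nSq_rep hm) hr
        have harith : r + (e + e) * (n >>> 1) = r + e * n := by
          rw [hn2]
          conv_rhs => rw [show n = 2*(n/2) by omega]
          ring
        rwa [harith] at this

-- ---- multmodp model ----

theorem nMmpAux_acc (p a b k : Nat) : nMmpAux p a b k = p ^^^ nMmpAux 0 a b k := by
  induction k generalizing p a b with
  | zero => simp [nMmpAux]
  | succ k ih =>
    simp only [nMmpAux]
    rw [ih, @ih (if a &&& 0x80000000 ≠ 0 then 0 ^^^ b else 0)]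
    by_cases h : a &&& 0x80000000 ≠ 0 <;>
      simp [h, Nat.xor_assoc]

theorem nMmpAux_zero_a (b k : Nat) : nMmpAux 0 0 b k = 0 := by
  induction k generalizing b with
  | zero => rfl
  | succ k ih =>
    simp only [nMmpAux]
    rw [if_neg (by decide)]
    have h2 : ((0 : Nat) <<< 1) &&& 0xFFFFFFFF = 0 := by decide
    rw [h2]
    exact ih (nT b)

theorem nMmpAux_linL (k : Nat) : ∀ x y b,
    nMmpAux 0 (x ^^^ y) b k = nMmpAux 0 x b k ^^^ nMmpAux 0 y b k := by
  induction k with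
  | zero => intro x y b; simp [nMmpAux]
  | succ k ih =>
    intro x y b
    simp only [nMmpAux]
    rw [nMmpAux_acc, @nMmpAux_acc (if x &&& 0x80000000 ≠ 0 then _ else _),
      @nMmpAux_acc (if y &&& 0x80000000 ≠ 0 then _ else _)]
    rw [Nat.shiftLeft_xor_distrib, Nat.and_xor_distrib_right, Nat.and_xor_distrib_right, ih]
    have hcases : ∀ z : Nat, z &&& 0x80000000 = 0 ∨ z &&& 0x80000000 = 0x80000000 := by
      intro z
      have h := Nat.and_two_pow z 31
      norm_num at h
      rcases Bool.eq_false_or_eq_true (z.testBit 31) with hb | hb <;> rw [hb] at h <;>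
        simp at h <;> omega
    rcases hcases x with hx | hx <;> rcases hcases y with hy | hy <;>
      simp [hx, hy, Nat.xor_comm, Nat.xor_left_comm, Nat.xor_self,
        Nat.xor_zero, Nat.zero_xor]

theorem nMmpAux_linR (k : Nat) : ∀ a x y,
    nMmpAux 0 a (x ^^^ y) k = nMmpAux 0 a x k ^^^ nMmpAux 0 a y k := by
  induction k with
  | zero => intro a x y; simp [nMmpAux]
  | succ k ih =>
    intro a x y
    simp only [nMmpAux]
    rw [nMmpAux_acc, @nMmpAux_acc (if a &&& 0x80000000 ≠ 0 then 0 ^^^ x else 0),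
      @nMmpAux_acc (if a &&& 0x80000000 ≠ 0 then 0 ^^^ y else 0)]
    rw [nT_lin, ih]
    by_cases h : a &&& 0x80000000 ≠ 0 <;>
      simp [h, Nat.xor_assoc, Nat.xor_comm, Nat.xor_left_comm]

theorem nMmpAux_lt (k : Nat) : ∀ p a b, p < 2^32 → b < 2^32 → nMmpAux p a b k < 2^32 := by
  induction k with
  | zero => intro p a b hp _; simpa [nMmpAux] using hp
  | succ k ih =>
    intro p a b hp hb
    simp only [nMmpAux]
    apply ih _ _ _ _ (nT_lt hb)
    split
    · exact Nat.xor_lt_two_pow hp hb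
    · exact hp

theorem nMmpAux_pow2 : ∀ (m k b : Nat), m < k → m ≤ 31 →
    nMmpAux 0 (2^(31-m)) b k = nTpow m b := by
  intro m
  induction m with
  | zero =>
    intro k b hk _
    match k, hk with
    | k+1, _ =>
      simp only [nMmpAux]
      rw [if_pos (by decide)]
      rw [show ((2:Nat)^(31-0) <<< 1) &&& 0xFFFFFFFF = 0 by decide]
      rw [nMmpAux_acc, nMmpAux_zero_a]
      simp [nTpow]
  | succ m ih =>
    intro k b hk hm
    match k, hk with
    | k+1, _ =>
      simp only [nMmpAux]
      have h31 : 31 - (m+1) = 30 - m := by omega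
      have hne : (2:Nat)^(30-m) &&& 0x80000000 = 0 := by
        have h := Nat.and_two_pow (2^(30-m) : Nat) 31
        rw [Nat.testBit_two_pow_of_ne (by omega)] at h
        norm_num at h ⊢
        exact h
      rw [h31, if_neg (by simp [hne])]
      have hsh : ((2:Nat)^(30-m) <<< 1) &&& 0xFFFFFFFF = 2^(31-m) := by
        rw [Nat.shiftLeft_eq, show (0xFFFFFFFF:Nat) = 2^32 - 1 by norm_num,
          Nat.and_two_pow_sub_one_eq_mod,
          show (2:Nat)^(30-m) * 2^1 = 2^(31-m) by rw [← Nat.pow_add]; congr 1; omega]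
        exact Nat.mod_eq_of_lt (Nat.pow_lt_pow_right (by norm_num) (by omega))
      rw [hsh, ih k (nT b) (by omega) (by omega), nTpow_inner]
      rfl

theorem nMmp_pow2 (j b : Nat) (hj : j < 32) : nMmp (2^j) b = nTpow (31-j) b := by
  unfold nMmp
  conv_lhs => rw [show j = 31 - (31 - j) by omega]
  exact nMmpAux_pow2 (31-j) 32 b (by omega) (by omega)

theorem nMmp_poly (b : Nat) (hb : b < 2^32) : nMmp nPOLY b = nTpow 32 b := by
  refine lin_ext (f := fun b => nMmp nPOLY b) (g := fun b => nTpow 32 b)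
    (fun x y => nMmpAux_linR 32 nPOLY x y) (fun x y => nTpow_lin 32 x y) ?_ b hb
  intro j hj
  interval_cases j <;> decide

theorem nTpow_succ (k v : Nat) : nTpow (k+1) v = nT (nTpow k v) := rfl

theorem nMmp_linL (x y b : Nat) : nMmp (x ^^^ y) b = nMmp x b ^^^ nMmp y b :=
  nMmpAux_linL 32 x y b

theorem nMmp_T_left {w b : Nat} (hw : w < 2^32) (hb : b < 2^32) :
    nMmp (nT w) b = nT (nMmp w b) := by
  refine lin_ext (f := fun w => nMmp (nT w) b) (g := fun w => nT (nMmp w b)) ?_ ?_ ?_ w hw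
  · intro x y
    show nMmp (nT (x ^^^ y)) b = _
    rw [nT_lin]
    exact nMmpAux_linL 32 (nT x) (nT y) b
  · intro x y
    show nT (nMmp (x ^^^ y) b) = _
    rw [nMmp_linL x y b, nT_lin]
  · intro j hj
    match j with
    | 0 =>
      show nMmp (nT (2^0)) b = nT (nMmp (2^0) b)
      rw [show nT (2^0) = nPOLY by decide, nMmp_poly b hb, nMmp_pow2 0 b (by omega),
        show (32:Nat) = 31 + 1 from rfl, nTpow_succ]
    | s+1 =>
      show nMmp (nT (2^(s+1))) b = nT (nMmp (2^(s+1)) b)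
      rw [nT_two_pow_succ, nMmp_pow2 s b (by omega), nMmp_pow2 (s+1) b (by omega),
        show 31 - s = (31 - (s+1)) + 1 by omega, nTpow_succ]

theorem nMmp_zero_left (b : Nat) : nMmp 0 b = 0 := nMmpAux_zero_a b 32

theorem nMmp_assoc (k : Nat) : ∀ s {c b : Nat}, c < 2^32 → b < 2^32 →
    nMmpAux 0 s (nMmp c b) k = nMmp (nMmpAux 0 s c k) b := by
  induction k with
  | zero =>
    intro s c b _ _
    simp [nMmpAux, nMmp_zero_left]
  | succ k ih =>
    intro s c b hc hb
    simp only [nMmpAux]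
    rw [nMmpAux_acc, @nMmpAux_acc (if s &&& 0x80000000 ≠ 0 then 0 ^^^ c else 0)]
    rw [← nMmp_T_left hc hb, ih (s <<< 1 &&& 0xFFFFFFFF) (nT_lt hc) hb]
    rw [show nMmp ((if s &&& 0x80000000 ≠ 0 then 0 ^^^ c else 0) ^^^
          nMmpAux 0 (s <<< 1 &&& 0xFFFFFFFF) (nT c) k) b
        = nMmp (if s &&& 0x80000000 ≠ 0 then 0 ^^^ c else 0) b ^^^
          nMmp (nMmpAux 0 (s <<< 1 &&& 0xFFFFFFFF) (nT c) k) b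
      from nMmpAux_linL 32 _ _ b]
    by_cases h : s &&& 0x80000000 ≠ 0 <;>
      simp [h, nMmp_zero_left]

theorem nMmp_assoc32 (s : Nat) {c b : Nat} (hc : c < 2^32) (hb : b < 2^32) :
    nMmp s (nMmp c b) = nMmp (nMmp s c) b := nMmp_assoc 32 s hc hb

theorem nMmp_lt {a b : Nat} (hb : b < 2^32) : nMmp a b < 2^32 :=
  nMmpAux_lt 32 0 a b (by norm_num) hb

theorem nPowX_rep : ∀ (n : Nat) {acc sq eA eS : Nat},
    acc < 2^32 → sq < 2^32 →
    (∀ b < 2^32, nMmp acc b = nTpow eA b) → (∀ b < 2^32, nMmp sq b = nTpow eS b) →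
    ∀ b < 2^32, nMmp (nPowX acc sq n) b = nTpow (eA + eS * n) b := by
  intro n
  induction n using Nat.strong_induction_on with
  | _ n ih =>
    intro acc sq eA eS hacc hsq hA hS b hb
    rw [nPowX]
    by_cases h0 : n = 0
    · simpa [h0] using hA b hb
    · simp only [h0, if_false]
      have hn2 : n >>> 1 = n / 2 := Nat.shiftRight_one n
      have hlt : n >>> 1 < n := by omega
      have hsq' : ∀ c < 2^32, nMmp (nMmp sq sq) c = nTpow (eS + eS) c := by
        intro c hc
        rw [← nMmp_assoc32 sq hsq hc, hS c hc, hS _ (nTpow_lt eS hc), nTpow_add]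
      by_cases hodd : n &&& 1 = 1
      · have hmod : n % 2 = 1 := by rw [← Nat.and_one_is_mod]; exact hodd
        simp only [hodd, if_pos]
        have hacc' : ∀ c < 2^32, nMmp (nMmp sq acc) c = nTpow (eS + eA) c := by
          intro c hc
          rw [← nMmp_assoc32 sq hacc hc, hA c hc, hS _ (nTpow_lt eA hc), nTpow_add]
        have := ih (n >>> 1) hlt (nMmp_lt hacc) (nMmp_lt hsq) hacc' hsq' b hb
        rw [this]
        congr 1
        rw [hn2]
        conv_rhs => rw [show n = 2*(n/2)+1 by omega]
        ring
      · have hmod : n % 2 = 0 := by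
          rcases Nat.mod_two_eq_zero_or_one n with h | h
          · exact h
          · exact absurd (by rwa [Nat.and_one_is_mod]) hodd
        simp only [hodd, if_false]
        have := ih (n >>> 1) hlt hacc (nMmp_lt hsq) hA hsq' b hb
        rw [this]
        congr 1
        rw [hn2]
        conv_rhs => rw [show n = 2*(n/2) by omega]
        ring

-- ---- the central Nat-level equivalence ----

theorem nMain (n : Nat) : ∀ v < 2^32,
    nGmm (nPowAux nBase nId n) v = nMmp (nPowX (2^31) (2^30) n) v := by
  intro v hv
  have hA : RepM (nPowAux nBase nId n) (0 + 1 * n) := nPowAux_rep n nBase_rep nId_rep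
  rw [nGmm_apply hA v hv]
  have hB := nPowX_rep n (acc := 2^31) (sq := 2^30) (eA := 0) (eS := 1)
    (by norm_num) (by norm_num)
    (fun b hb => by rw [nMmp_pow2 31 b (by omega)])
    (fun b hb => by rw [nMmp_pow2 30 b (by omega)])
    v hv
  rw [hB]

-- ---- transport of the Int ports to the Nat model ----

theorem int_shiftRight_one (v : Int) : v >>> (1:Int) = v / 2 := by
  cases v with
  | ofNat m =>
    rw [show ((Int.ofNat m) >>> (1:Int)) = Int.ofNat (m >>> 1) from rfl, Nat.shiftRight_one]
    rfl
  | negSucc m =>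
    rw [show ((Int.negSucc m) >>> (1:Int)) = Int.negSucc (m >>> 1) from rfl, Nat.shiftRight_one]
    rfl

theorem int_band_one_add (v c : Int) : PySem.Int.band (v + c * 2) 1 = PySem.Int.band v 1 := by
  rw [PySem.Int.band_one, PySem.Int.band_one,
    PySem.Int.mod_eq_emod_of_pos (by norm_num), PySem.Int.mod_eq_emod_of_pos (by norm_num)]
  omega

theorem pvGmmAux_shift_inv : ∀ (k : Nat) (mat : List Int) (r v c : Int) (i : Nat),
    pvGmmAux mat r (v + c * 2^k) i k = pvGmmAux mat r v i k := by
  intro k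
  induction k with
  | zero => intro mat r v c i; simp [pvGmmAux]
  | succ k ih =>
    intro mat r v c i
    simp only [pvGmmAux]
    have hv2 : v + c * 2^(k+1) = v + (c * 2^k) * 2 := by ring
    have hcond : PySem.Int.band (v + c * 2^(k+1)) 1 = PySem.Int.band v 1 := by
      rw [hv2, int_band_one_add]
    have hshift : (v + c * 2^(k+1)) >>> (1:Int) = v >>> (1:Int) + c * 2^k := by
      rw [int_shiftRight_one, int_shiftRight_one, hv2,
        Int.add_mul_ediv_right v (c * 2^k) (by norm_num)]
    rw [hcond, hshift, ih]

theorem getD_map_cast (mat : List Nat) (i : Nat) :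
    (mat.map (Nat.cast : Nat → Int)).getD i 0 = ((mat.getD i 0 : Nat) : Int) := by
  rw [List.getD_eq_getElem?_getD, List.getD_eq_getElem?_getD, List.getElem?_map]
  cases h : mat[i]? <;> simp

theorem int_cast_shiftRight_one (w : Nat) : ((w : Nat) : Int) >>> (1:Int) = ((w >>> 1 : Nat) : Int) := rfl

theorem int_band_cast_one (w : Nat) : PySem.Int.band ((w : Nat) : Int) 1 = (((w &&& 1 : Nat)) : Int) := by
  have h := PySem.Int.band_natCast w 1
  simpa using h

theorem pvGmmAux_cast : ∀ (k : Nat) (mat : List Nat) (r w i : Nat),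
    pvGmmAux (mat.map (Nat.cast)) (r : Int) ((w : Nat) : Int) i k = ((nGmmAux mat r w i k : Nat) : Int) := by
  intro k
  induction k with
  | zero => intro mat r w i; simp [pvGmmAux, nGmmAux]
  | succ k ih =>
    intro mat r w i
    simp only [pvGmmAux, nGmmAux]
    have hw1 : w &&& 1 = w % 2 := Nat.and_one_is_mod w
    have hcond : (PySem.Int.band ((w : Nat) : Int) 1 ≠ 0) ↔ (w &&& 1 = 1) := by
      rw [int_band_cast_one]
      simp only [ne_eq, Nat.cast_eq_zero]
      omega
    rw [int_cast_shiftRight_one]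
    by_cases h : w &&& 1 = 1
    · rw [if_pos (hcond.mpr h), if_pos h, getD_map_cast,
        show PySem.Int.bxor (r : Int) ((mat.getD i 0 : Nat) : Int) = ((r ^^^ mat.getD i 0 : Nat) : Int)
          from PySem.Int.bxor_natCast r (mat.getD i 0)]
      exact ih mat (r ^^^ mat.getD i 0) (w >>> 1) (i+1)
    · rw [if_neg (fun hc => h (hcond.mp hc)), if_neg h]
      exact ih mat r (w >>> 1) (i+1)

theorem pvGmm_cast (mat : List Nat) (w : Nat) :
    pvGf2MatrixMultiply (mat.map (Nat.cast)) ((w : Nat) : Int) = ((nGmm mat w : Nat) : Int) := by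
  unfold pvGf2MatrixMultiply nGmm
  have h := pvGmmAux_cast 32 mat 0 w 0
  simpa using h

theorem pvSq_cast (mat : List Nat) :
    pvGf2MatrixSquare (mat.map (Nat.cast)) = (nSq mat).map (Nat.cast) := by
  unfold pvGf2MatrixSquare nSq
  rw [List.map_map]
  apply List.map_congr_left
  intro i _
  show pvGf2MatrixMultiply (mat.map (Nat.cast)) ((mat.map (Nat.cast : Nat → Int)).getD i 0) = _
  rw [getD_map_cast, pvGmm_cast]
  rfl

theorem pvPowAux_cast : ∀ (n : Nat) (mat res : List Nat),
    pvPowAux (mat.map (Nat.cast)) (res.map (Nat.cast)) n = (nPowAux mat res n).map (Nat.cast) := by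
  intro n
  induction n using Nat.strong_induction_on with
  | _ n ih =>
    intro mat res
    rw [pvPowAux, nPowAux]
    by_cases h0 : n = 0
    · simp [h0]
    · simp only [h0, if_false]
      have hlt : n >>> 1 < n := by
        rw [Nat.shiftRight_one]; omega
      have hmaps : ((List.range 32).map fun i => pvGf2MatrixMultiply (mat.map (Nat.cast)) ((res.map (Nat.cast : Nat → Int)).getD i 0))
          = ((List.range 32).map fun i => nGmm mat (res.getD i 0)).map (Nat.cast) := by
        rw [List.map_map]
        apply List.map_congr_left
        intro i _
        show pvGf2MatrixMultiply (mat.map (Nat.cast)) ((res.map (Nat.cast : Nat → Int)).getD i 0) = _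
        rw [getD_map_cast, pvGmm_cast]
        rfl
      by_cases hodd : n &&& 1 = 1
      · rw [if_pos hodd, if_pos hodd, pvSq_cast mat, hmaps]
        exact ih (n >>> 1) hlt (nSq mat) _
      · rw [if_neg hodd, if_neg hodd, pvSq_cast mat]
        exact ih (n >>> 1) hlt (nSq mat) res

theorem pvMatrixPower_cast (l : Int) :
    pvCrc32MatrixPower l = (nPowAux nBase nId l.toNat).map (Nat.cast) := by
  unfold pvCrc32MatrixPower
  dsimp only
  have hmat : ((List.range 32).map fun (i : Nat) => if i = 0 then pvPOLY else (1 : Int) <<< (i-1))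
      = nBase.map (Nat.cast) := by
    unfold nBase
    rw [List.map_map]
    apply List.map_congr_left
    intro i _
    by_cases h : i = 0
    · simp [h, pvPOLY, nPOLY]
    · simp only [h, Function.comp_apply, if_false]
      rfl
  have hres : ((List.range 32).map fun (i : Nat) => (1 : Int) <<< i) = nId.map (Nat.cast) := by
    unfold nId
    rw [List.map_map]
    apply List.map_congr_left
    intro i _
    rfl
  rw [hmat, hres, pvPowAux_cast]

theorem int_band_mask (v : Int) : PySem.Int.band v 0xFFFFFFFF = v % (2^32) := by
  by_cases hv : 0 ≤ v
  · rw [PySem.Int.band_of_nonneg hv (by norm_num)]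
    rw [show ((0xFFFFFFFF:Int)).toNat = 2^32 - 1 by decide, Nat.and_two_pow_sub_one_eq_mod]
    simp only [show ((2:Nat)^32) = 4294967296 by norm_num, show ((2:Int)^32) = 4294967296 by norm_num]
    omega
  · simp only [PySem.Int.band]
    rw [if_neg (by omega), if_pos (by norm_num)]
    rw [show ((0xFFFFFFFF:Int)).toNat = 2^32 - 1 by decide, Nat.and_comm,
      Nat.and_two_pow_sub_one_eq_mod]
    simp only [show ((2:Nat)^32) = 4294967296 by norm_num, show ((2:Int)^32) = 4294967296 by norm_num]
    omega

theorem pvMmpAux_cast : ∀ (k : Nat) (p a b : Nat),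
    pvMmpAux (p : Int) (a : Int) (b : Int) k = ((nMmpAux p a b k : Nat) : Int) := by
  intro k
  induction k with
  | zero => intro p a b; simp [pvMmpAux, nMmpAux]
  | succ k ih =>
    intro p a b
    simp only [pvMmpAux, nMmpAux]
    have htop : PySem.Int.band ((a : Nat) : Int) 0x80000000 = ((a &&& 0x80000000 : Nat) : Int) := by
      have h := PySem.Int.band_natCast a 0x80000000
      rw [← h]
      norm_num
    have hcond : (PySem.Int.band ((a : Nat) : Int) 0x80000000 ≠ 0) ↔ (a &&& 0x80000000 ≠ 0) := by
      rw [htop]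
      simp
    have hshl : ((a : Nat) : Int) <<< (1:Int) = ((a <<< 1 : Nat) : Int) := rfl
    have hband : PySem.Int.band ((a <<< 1 : Nat) : Int) 0xFFFFFFFF = (((a <<< 1) &&& 0xFFFFFFFF : Nat) : Int) := by
      have h := PySem.Int.band_natCast (a <<< 1) 0xFFFFFFFF
      rw [← h]
      norm_num
    have hb1 : (PySem.Int.band ((b : Nat) : Int) 1 ≠ 0) ↔ (b &&& 1 = 1) := by
      rw [int_band_cast_one]
      have := Nat.and_one_is_mod b
      simp only [ne_eq, Nat.cast_eq_zero]
      omega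
    have hbT : PySem.Int.bxor (((b : Nat) : Int) >>> (1:Int)) (if PySem.Int.band ((b : Nat) : Int) 1 ≠ 0 then 0xEDB88320 else 0)
        = ((nT b : Nat) : Int) := by
      rw [int_cast_shiftRight_one]
      unfold nT nPOLY
      by_cases h : b &&& 1 = 1
      · rw [if_pos (hb1.mpr h), if_pos h,
          show (0xEDB88320 : Int) = ((0xEDB88320 : Nat) : Int) by norm_num,
          PySem.Int.bxor_natCast]
      · rw [if_neg (fun hc => h (hb1.mp hc)), if_neg h,
          show (0 : Int) = ((0 : Nat) : Int) by norm_num,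
          PySem.Int.bxor_natCast]
    rw [hshl, hband, hbT]
    by_cases h : a &&& 0x80000000 ≠ 0
    · rw [if_pos (hcond.mpr h), if_pos h, PySem.Int.bxor_natCast]
      exact ih (p ^^^ b) ((a <<< 1) &&& 0xFFFFFFFF) (nT b)
    · rw [if_neg (fun hc => h (hcond.mp hc)), if_neg h]
      exact ih p ((a <<< 1) &&& 0xFFFFFFFF) (nT b)

theorem pvMmp_cast (a b : Nat) : pvMultmodp ((a : Nat) : Int) ((b : Nat) : Int) = ((nMmp a b : Nat) : Int) := by
  unfold pvMultmodp nMmp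
  have h := pvMmpAux_cast 32 0 a b
  simpa using h

theorem pvPowXAux_cast : ∀ (n : Nat) (acc sq : Nat),
    pvPowXAux (acc : Int) (sq : Int) n = ((nPowX acc sq n : Nat) : Int) := by
  intro n
  induction n using Nat.strong_induction_on with
  | _ n ih =>
    intro acc sq
    rw [pvPowXAux, nPowX]
    by_cases h0 : n = 0
    · simp [h0]
    · simp only [h0, if_false]
      have hlt : n >>> 1 < n := by
        rw [Nat.shiftRight_one]; omega
      by_cases hodd : n &&& 1 = 1
      · rw [if_pos hodd, if_pos hodd, pvMmp_cast, pvMmp_cast]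
        exact ih (n >>> 1) hlt (nMmp sq acc) (nMmp sq sq)
      · rw [if_neg hodd, if_neg hodd, pvMmp_cast]
        exact ih (n >>> 1) hlt acc (nMmp sq sq)

-- ===== VERDICT (by name: the statement is the Claim_ definition above) =====
theorem combine_crc32_spec : Claim_equal_combine_crc32 := by
  unfold Claim_equal_combine_crc32
  intro crc1 crc2 len2 _
  unfold Spec_combine_crc32 combine_crc32 combine_crc32_alt
  by_cases h : len2 = 0
  · rw [if_pos h, if_pos h]
  · rw [if_neg h, if_neg h]
    dsimp only
    set n : Nat := (len2 * 8).toNat with hn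
    set w : Nat := (crc1 % (2^32)).toNat with hwdef
    have hw0 : 0 ≤ crc1 % (2^32) := Int.emod_nonneg crc1 (by norm_num)
    have hwlt0 : crc1 % (2^32) < 2^32 := Int.emod_lt_of_pos crc1 (by norm_num)
    have hwcast : ((w : Nat) : Int) = crc1 % (2^32) := by
      simp only [show ((2:Int)^32) = 4294967296 by norm_num] at *
      omega
    have hwlt : w < 2^32 := by omega
    have hA : pvGf2MatrixMultiply (pvCrc32MatrixPower (len2*8)) crc1
        = ((nGmm (nPowAux nBase nId n) w : Nat) : Int) := by
      unfold pvGf2MatrixMultiply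
      have hsplit : crc1 = ((w : Nat) : Int) + (crc1 / 2^32) * 2^32 := by
        rw [hwcast, Int.emod_def]
        ring
      rw [hsplit, pvGmmAux_shift_inv 32, pvMatrixPower_cast]
      have := pvGmmAux_cast 32 (nPowAux nBase nId n) 0 w 0
      simpa [hn] using this
    have hB : pvMultmodp (pvPowXAux 0x80000000 0x40000000 n) (PySem.Int.band crc1 0xFFFFFFFF)
        = ((nMmp (nPowX (2^31) (2^30) n) w : Nat) : Int) := by
      rw [int_band_mask, ← hwcast,
        show (0x80000000 : Int) = (((2^31 : Nat)) : Int) by norm_num,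
        show (0x40000000 : Int) = (((2^30 : Nat)) : Int) by norm_num,
        pvPowXAux_cast, pvMmp_cast]
    rw [hA, hB, nMain n w hwlt]
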